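-- pv_equiv track=rewrite | github.com/ZhouRUNLIN/LU3IN003-ALGO2 | codes/projet.py | draw_T_2
-- ===== SOURCE A (Python) =====
-- def min_3(a:int,b:int,c:int):
--     """
--     Trouver le plus petit chiffre entre a,b et c.
--     """
--     if a>b:
--         a=b
--     if a>c:
--         a=c
--     return a
--
-- def cost_sub(x:str,y:str,i:int,j:int):
--     """
--     Calculer le c_sub de x[i] et y[j]
--     """
--     if x[i-1]==y[j-1]:
--         return 0
--     elif (x[i-1]=='C' and y[j-1]=='G') or (x[i-1]=='G' and y[j-1]=='C') or (x[i-1]=='A' and y[j-1]=='T') or (x[i-1]=='T' and y[j-1]=='A'):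
--         return 3
--     else:
--         return 4
--
-- def draw_T_2(x:str,y:str):
--     """
--     Dessiner la graphe comme dist_2, mais avec les directions
--     retourne : list(list(couple(int,str)))
--     N,L,U,LU:none, left, up, left up
--     """
--     n=len(x)
--     m=len(y)
--     T=[[[0,"N"]]*(len(y)+1) for i in range(len(x)+1)]
--     for i in range(n+1):
--         for j in range(m+1):
--             if i==0 and j==0:
--                 T[i][j]=[0,"N"]
--                 continue
--             if i==0:
--                 T[i][j]=[j*2,"L"]
--                 continue
--             if j==0:
--                 T[i][j]=[i*2,"U"]
--                 continue
--             dist=min_3(T[i-1][j][0]+2,T[i][j-1][0]+2,T[i-1][j-1][0]+cost_sub(x,y,i,j))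
--             if dist==T[i][j-1][0]+2:
--                 dir="L"
--             elif dist==T[i-1][j-1][0]+cost_sub(x,y,i,j):
--                 dir="LU"
--             else:
--                 dir="U"
--             T[i][j]=[dist,dir]
--     return T
-- ===== SOURCE B (Python) =====
-- _COMP = {'C': 'G', 'G': 'C', 'A': 'T', 'T': 'A'}
--
-- def draw_T_2(x, y):
--     memo = {}
--
--     def cell(i, j):
--         r = memo.get((i, j))
--         if r is not None:
--             return r
--         if i == 0 and j == 0:
--             r = [0, "N"]
--         elif i == 0:
--             r = [2 * j, "L"]
--         elif j == 0:
--             r = [2 * i, "U"]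
--         else:
--             up = cell(i - 1, j)[0] + 2
--             left = cell(i, j - 1)[0] + 2
--             a, b = x[i - 1], y[j - 1]
--             sub = 0 if a == b else 3 if _COMP.get(a) == b else 4
--             diag = cell(i - 1, j - 1)[0] + sub
--             dist = min(up, left, diag)
--             r = [dist, "L" if dist == left else "LU" if dist == diag else "U"]
--         memo[(i, j)] = r
--         return r
--
--     return [[cell(i, j) for j in range(len(y) + 1)] for i in range(len(x) + 1)]
-- ===== Notes on version B (the rewrite author's own statement) =====
-- stated objective: alternative
-- what changed: A fills a preallocated (n+1)x(m+1) table bottom-up in one guarded nested loop mutating cells in place; B defines the cell value as a top-down recursive function with a dict memo (driven per cell, so recursion depth stays constant) and produces the table as a comprehension of calls.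
import Mathlib
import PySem

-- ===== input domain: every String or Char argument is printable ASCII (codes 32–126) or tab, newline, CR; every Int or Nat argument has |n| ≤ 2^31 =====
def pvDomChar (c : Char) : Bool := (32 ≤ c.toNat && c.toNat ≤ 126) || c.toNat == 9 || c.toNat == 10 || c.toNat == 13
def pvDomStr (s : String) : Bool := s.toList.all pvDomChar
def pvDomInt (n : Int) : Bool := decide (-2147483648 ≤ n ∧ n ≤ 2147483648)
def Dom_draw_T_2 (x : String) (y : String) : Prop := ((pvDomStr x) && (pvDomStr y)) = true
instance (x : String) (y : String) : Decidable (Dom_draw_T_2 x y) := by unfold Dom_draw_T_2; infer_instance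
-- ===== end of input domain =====

-- B replaces A's bottom-up guarded table fill with a top-down recursive cell
-- function memoised in a dict; the table is produced by a comprehension of calls
-- (objective: alternative decomposition, same O(n·m) cost).

-- ===== PORT A =====
def min_3 (a b c : Int) : Int :=
  let a := if a > b then b else a
  if a > c then c else a

-- x[i-1]/y[j-1] ported with getD: draw_T_2 only calls with 1 ≤ i ≤ len x, 1 ≤ j ≤ len y,
-- so the index is always in range and the default is never read (exact there).
def cost_sub (x y : List Char) (i j : Nat) : Int :=
  if x.getD (i-1) ' ' = y.getD (j-1) ' ' then 0
  else if (x.getD (i-1) ' ' = 'C' ∧ y.getD (j-1) ' ' = 'G') ∨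
          (x.getD (i-1) ' ' = 'G' ∧ y.getD (j-1) ' ' = 'C') ∨
          (x.getD (i-1) ' ' = 'A' ∧ y.getD (j-1) ' ' = 'T') ∨
          (x.getD (i-1) ' ' = 'T' ∧ y.getD (j-1) ' ' = 'A') then 3
  else 4

-- the loop body of A (the two `continue` guards become the first branches);
-- the T[...] reads are always in range in A, so getD's default is never read (exact there).
def aCell (x y : List Char) (T : List (List (Int × String))) (i j : Nat) : Int × String :=
  if i = 0 ∧ j = 0 then ((0 : Int), "N")
  else if i = 0 then ((j : Int) * 2, "L")
  else if j = 0 then ((i : Int) * 2, "U")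
  else
    let dist := min_3 (((T.getD (i-1) []).getD j ((0:Int),"N")).1 + 2)
                      (((T.getD i []).getD (j-1) ((0:Int),"N")).1 + 2)
                      (((T.getD (i-1) []).getD (j-1) ((0:Int),"N")).1 + cost_sub x y i j)
    let dir := if dist = ((T.getD i []).getD (j-1) ((0:Int),"N")).1 + 2 then "L"
      else if dist = ((T.getD (i-1) []).getD (j-1) ((0:Int),"N")).1 + cost_sub x y i j then "LU"
      else "U"
    (dist, dir)

-- T[i][j] = cell  (rebinding one entry of the mutable table)
def aInner (x y : List Char) (i : Nat) (T : List (List (Int × String))) (j : Nat) :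
    List (List (Int × String)) :=
  T.set i ((T.getD i []).set j (aCell x y T i j))

def draw_T_2 (x : String) (y : String) : List (List (Int × String)) :=
  let n := x.toList.length
  let m := y.toList.length
  let T0 : List (List (Int × String)) := List.replicate (n+1) (List.replicate (m+1) ((0:Int), "N"))
  (List.range (n+1)).foldl (fun T i =>
    (List.range (m+1)).foldl (aInner x.toList y.toList i) T) T0

-- ===== PORT B =====
-- _COMP.get(a) of Source B
def compGet (a : Char) : Option Char :=
  PySem.Dict.get? (PySem.Dict.ofList [('C','G'), ('G','C'), ('A','T'), ('T','A')]) a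

-- the inner recursive `cell` of Source B, with the memo dict threaded explicitly
-- (in Python the closure mutates `memo`; threading it is the same computation).
-- x[i-1]/y[j-1] are in range whenever read (1 ≤ i ≤ len x, 1 ≤ j ≤ len y), so getD is exact there.
def bCell (x y : List Char) (i j : Nat)
    (memo : PySem.Dict (Nat × Nat) (Int × String)) :
    (Int × String) × PySem.Dict (Nat × Nat) (Int × String) :=
  match PySem.Dict.get? memo (i, j) with
  | some r => (r, memo)
  | none =>
    match i, j with
    | 0, 0 =>
      (((0:Int), "N"), PySem.Dict.insert memo (0, 0) ((0:Int), "N"))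
    | 0, j'+1 =>
      ((2 * ((j':Int)+1), "L"), PySem.Dict.insert memo (0, j'+1) (2 * ((j':Int)+1), "L"))
    | i'+1, 0 =>
      ((2 * ((i':Int)+1), "U"), PySem.Dict.insert memo (i'+1, 0) (2 * ((i':Int)+1), "U"))
    | i'+1, j'+1 =>
      let c1 := bCell x y i' (j'+1) memo
      let up := c1.1.1 + 2
      let c2 := bCell x y (i'+1) j' c1.2
      let left := c2.1.1 + 2
      let a := x.getD i' ' '
      let b := y.getD j' ' '
      let sub : Int := if a = b then 0 else if compGet a = some b then 3 else 4
      let c3 := bCell x y i' j' c2.2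
      let diag := c3.1.1 + sub
      let dist := min (min up left) diag
      let r := (dist, if dist = left then "L" else if dist = diag then "LU" else "U")
      (r, PySem.Dict.insert c3.2 (i'+1, j'+1) r)
  termination_by (i, j)

-- the inner comprehension `[cell(i, j) for j in range(m+1)]` with the memo threaded
def bInner (x y : List Char) (i : Nat)
    (rs : List (Int × String) × PySem.Dict (Nat × Nat) (Int × String)) (j : Nat) :
    List (Int × String) × PySem.Dict (Nat × Nat) (Int × String) :=
  let c := bCell x y i j rs.2
  (rs.1 ++ [c.1], c.2)

-- one step of the outer comprehension
def bOuter (x y : List Char) (m : Nat)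
    (st : List (List (Int × String)) × PySem.Dict (Nat × Nat) (Int × String)) (i : Nat) :
    List (List (Int × String)) × PySem.Dict (Nat × Nat) (Int × String) :=
  let rs := (List.range (m+1)).foldl (bInner x y i) ([], st.2)
  (st.1 ++ [rs.1], rs.2)

def draw_T_2_alt (x : String) (y : String) : List (List (Int × String)) :=
  let n := x.toList.length
  let m := y.toList.length
  ((List.range (n+1)).foldl (bOuter x.toList y.toList m) ([], PySem.Dict.empty)).1

-- ===== PRECONDITION & SPEC =====
def Spec_draw_T_2 (x : String) (y : String) (out : List (List (Int × String))) : Prop := out = draw_T_2_alt x y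
instance (x : String) (y : String) (out : List (List (Int × String))) : Decidable (Spec_draw_T_2 x y out) := by unfold Spec_draw_T_2; infer_instance

-- ===== CLAIM (what is proved, stated in full; the proofs are below) =====
def Claim_equal_draw_T_2 : Prop := ∀ (x : String) (y : String), Dom_draw_T_2 x y → Spec_draw_T_2 x y (draw_T_2 x y)

-- ===== LEMMAS AND PROOFS =====

-- proof-side substitution cost (membership form)
def pySub (x y : List Char) (i j : Nat) : Int :=
  let a := x.getD (i-1) ' '
  let b := y.getD (j-1) ' '
  if a = b then 0 else if (a, b) ∈ [('C','G'), ('G','C'), ('A','T'), ('T','A')] then 3 else 4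

-- the mathematical cell value both programs compute
def valF (x y : List Char) : Nat → Nat → Int × String
  | 0, 0 => ((0:Int), "N")
  | 0, j+1 => (2 * ((j:Int)+1), "L")
  | i+1, 0 => (2 * ((i:Int)+1), "U")
  | i+1, j+1 =>
    let up := (valF x y i (j+1)).1 + 2
    let left := (valF x y (i+1) j).1 + 2
    let diag := (valF x y i j).1 + pySub x y (i+1) (j+1)
    let dist := min (min up left) diag
    (dist, if dist = left then "L" else if dist = diag then "LU" else "U")
  termination_by i j => (i, j)

-- row-shaped description of A's table (proof helpers)
def bStep (x y : List Char) (prev : List (Int × String)) (i : Nat)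
    (row : List (Int × String)) (j0 : Nat) : List (Int × String) :=
  let j := j0 + 1
  let left := (row.getD (j-1) ((0:Int),"N")).1 + 2
  let up := (prev.getD j ((0:Int),"N")).1 + 2
  let diag := (prev.getD (j-1) ((0:Int),"N")).1 + pySub x y i j
  let dist := min (min left up) diag
  let d := if dist = left then "L" else if dist = diag then "LU" else "U"
  row ++ [(dist, d)]

def bNext (x y : List Char) (prev : List (Int × String)) (i : Nat) (m : Nat) :
    List (Int × String) :=
  (List.range m).foldl (bStep x y prev i) [(2 * (i : Int), "U")]

def rowFn (x y : List Char) (m : Nat) : Nat → List (Int × String)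
  | 0 => ((0:Int), "N") :: (List.range m).map (fun (j : Nat) => (2 * ((j : Int) + 1), "L"))
  | i+1 => bNext x y (rowFn x y m i) (i+1) m

def bRow0 (m : Nat) : List (Int × String) :=
  ((0:Int), "N") :: (List.range m).map (fun (j : Nat) => (2 * ((j : Int) + 1), "L"))

def aCell0 (j : Nat) : Int × String :=
  if j = 0 then ((0:Int), "N") else ((j : Int) * 2, "L")

lemma cost_eq (x y : List Char) (i j : Nat) : cost_sub x y i j = pySub x y i j := by
  unfold cost_sub pySub
  simp only [List.mem_cons, List.not_mem_nil, or_false, Prod.mk.injEq]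

lemma min3_eq (a b c : Int) : min_3 a b c = min (min b a) c := by
  unfold min_3
  simp only [min_def]
  split_ifs <;> omega

lemma getD_append_left {α : Type} (l₁ l₂ : List α) (i : Nat) (d : α) (h : i < l₁.length) :
    (l₁ ++ l₂).getD i d = l₁.getD i d := by
  simp [List.getD, List.getElem?_append_left h]

lemma getD_append_len {α : Type} (l₁ l₂ : List α) (d : α) :
    (l₁ ++ l₂).getD l₁.length d = l₂.getD 0 d := by
  simp [List.getD, List.getElem?_append_right (Nat.le_refl _)]

lemma set_append_len {α : Type} (l₁ l₂ : List α) (v : α) :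
    (l₁ ++ l₂).set l₁.length v = l₁ ++ l₂.set 0 v := by
  rw [List.set_append_right _ _ (Nat.le_refl _)]
  simp

lemma set_append_of_length {α : Type} {l₁ : List α} {k : Nat} (h : l₁.length = k)
    (l₂ : List α) (v : α) : (l₁ ++ l₂).set k v = l₁ ++ l₂.set 0 v := by
  subst h; exact set_append_len l₁ l₂ v

lemma getD_append_of_length {α : Type} {l₁ : List α} {k : Nat} (h : l₁.length = k)
    (l₂ : List α) (d : α) : (l₁ ++ l₂).getD k d = l₂.getD 0 d := by
  subst h; exact getD_append_len l₁ l₂ d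

lemma drop_fill_cons (m k : Nat) (hk : k ≤ m) :
    (List.replicate (m+1) ((0:Int),"N")).drop k
      = ((0:Int),"N") :: (List.replicate (m+1) ((0:Int),"N")).drop (k+1) := by
  rw [List.drop_replicate, List.drop_replicate]
  have h1 : m + 1 - k = (m - k) + 1 := by omega
  have h2 : m + 1 - (k+1) = m - k := by omega
  rw [h1, h2, List.replicate_succ]

lemma aCell_zero (x y : List Char) (T : List (List (Int × String))) (j : Nat) :
    aCell x y T 0 j = aCell0 j := by
  unfold aCell aCell0
  by_cases h : j = 0 <;> simp [h]

lemma bStep_length (x y : List Char) (prev row : List (Int × String)) (i j0 : Nat) :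
    (bStep x y prev i row j0).length = row.length + 1 := by
  simp [bStep]

lemma bPrefix_length (x y : List Char) (prev : List (Int × String)) (i : Nat) :
    ∀ k, ((List.range k).foldl (bStep x y prev i) [(2 * (i : Int), "U")]).length = k + 1 := by
  intro k
  induction k with
  | zero => simp
  | succ k ih => rw [List.range_succ, List.foldl_append]; simp [bStep_length, ih]

-- row 0: A's inner loop at i = 0 writes the border row, independent of T
lemma innerA_zero (x y : List Char) (m : Nat) (rest : List (List (Int × String))) :
    ∀ k, k ≤ m + 1 →
    (List.range k).foldl (aInner x y 0) (List.replicate (m+1) ((0:Int), "N") :: rest)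
      = (((List.range k).map aCell0) ++ (List.replicate (m+1) ((0:Int), "N")).drop k) :: rest := by
  intro k hk
  induction k with
  | zero => simp
  | succ k ih =>
    rw [List.range_succ, List.foldl_append, ih (Nat.le_of_succ_le hk)]
    simp only [List.foldl_cons, List.foldl_nil]
    unfold aInner
    rw [aCell_zero]
    have hlen : ((List.range k).map aCell0).length = k := by simp
    simp only [List.getD_cons_zero, List.set_cons_zero]
    rw [set_append_of_length hlen, drop_fill_cons m k (by omega), List.set_cons_zero]
    simp [List.map_append]

lemma row0_eq_bRow0 (m : Nat) : (List.range (m+1)).map aCell0 = bRow0 m := by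
  apply List.ext_getElem
  · simp [bRow0]
  · intro i h1 h2
    match i with
    | 0 => simp [aCell0, bRow0]
    | j+1 =>
      have hb : (bRow0 m)[j+1]'h2 = (2*((j:Int)+1), "L") := by
        simp only [bRow0, List.getElem_cons_succ, List.getElem_map, List.getElem_range]
      simp only [List.getElem_map, List.getElem_range, hb, aCell0]
      rw [if_neg (by omega)]
      simp only [Prod.mk.injEq]
      refine ⟨by push_cast; ring, trivial⟩

-- the cell value appended by bStep (proof helper)
def bCellV (x y : List Char) (prev row : List (Int × String)) (i j0 : Nat) : Int × String :=
  let j := j0 + 1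
  let left := (row.getD (j-1) ((0:Int),"N")).1 + 2
  let up := (prev.getD j ((0:Int),"N")).1 + 2
  let diag := (prev.getD (j-1) ((0:Int),"N")).1 + pySub x y i j
  let dist := min (min left up) diag
  let d := if dist = left then "L" else if dist = diag then "LU" else "U"
  (dist, d)

lemma bStep_eq (x y : List Char) (prev row : List (Int × String)) (i j0 : Nat) :
    bStep x y prev i row j0 = row ++ [bCellV x y prev row i j0] := rfl

lemma bCellV_congr (x y : List Char) (prev row1 row2 : List (Int × String)) (i j0 : Nat)
    (hrow : row1.getD j0 ((0:Int),"N") = row2.getD j0 ((0:Int),"N")) :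
    bCellV x y prev row1 i j0 = bCellV x y prev row2 i j0 := by
  simp only [bCellV, Nat.add_sub_cancel, hrow]

lemma aCell_eq_bCellV (x y : List Char) (T : List (List (Int × String)))
    (prev row : List (Int × String)) (i j0 : Nat)
    (hprev : T.getD i [] = prev) (hcur : T.getD (i+1) [] = row) :
    aCell x y T (i+1) (j0+1) = bCellV x y prev row (i+1) j0 := by
  unfold aCell bCellV
  rw [if_neg (by simp), if_neg (by omega), if_neg (by omega)]
  simp only [Nat.add_sub_cancel, hprev, hcur, cost_eq, min3_eq]

-- rows i ≥ 1: A's inner loop run on (R ++ fill :: rest) builds bNext of the previous row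
lemma innerA_succ (x y : List Char) (m : Nat) (i : Nat)
    (R rest : List (List (Int × String))) (prev : List (Int × String))
    (hR : R.length = i + 1) (hprev : R.getD i [] = prev) :
    ∀ k, k ≤ m →
    (List.range (k+1)).foldl (aInner x y (i+1)) (R ++ List.replicate (m+1) ((0:Int),"N") :: rest)
      = R ++ (((List.range k).foldl (bStep x y prev (i+1)) [(2 * ((i:Int) + 1), "U")])
                ++ (List.replicate (m+1) ((0:Int),"N")).drop (k+1)) :: rest := by
  have hprev' : ∀ (L : List (Int × String)) rs, (R ++ L :: rs).getD i [] = prev := by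
    intro L rs
    rw [getD_append_left _ _ _ _ (by omega)]
    exact hprev
  have hcur : ∀ (L : List (Int × String)) rs, (R ++ L :: rs).getD (i+1) [] = L := by
    intro L rs
    rw [getD_append_of_length hR]
    rfl
  have hset : ∀ (L v : List (Int × String)) rs, (R ++ L :: rs).set (i+1) v = R ++ v :: rs := by
    intro L v rs
    rw [set_append_of_length hR, List.set_cons_zero]
  intro k
  induction k with
  | zero =>
    intro _
    rw [List.range_succ]
    simp only [List.range_zero, List.nil_append, List.foldl_cons, List.foldl_nil]
    unfold aInner
    rw [hcur, hset]
    have hc : aCell x y (R ++ List.replicate (m+1) ((0:Int),"N") :: rest) (i+1) 0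
        = (2 * ((i:Int) + 1), "U") := by
      unfold aCell
      rw [if_neg (by omega), if_neg (by omega), if_pos rfl]
      simp only [Prod.mk.injEq]
      refine ⟨by push_cast; ring, trivial⟩
    rw [hc]
    conv_lhs => rw [show List.replicate (m+1) ((0:Int),"N") = ((0:Int),"N") :: (List.replicate (m+1) ((0:Int),"N")).drop 1 from by simp [List.replicate_succ]]
    rw [List.set_cons_zero]
    rfl
  | succ k ihk =>
    intro hk
    rw [List.range_succ, List.foldl_append, ihk (by omega)]
    simp only [List.foldl_cons, List.foldl_nil]
    unfold aInner
    set P := (List.range k).foldl (bStep x y prev (i+1)) [(2 * ((i:Int) + 1), "U")] with hP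
    have hPlen : P.length = k + 1 := bPrefix_length x y prev (i+1) k
    set L := P ++ (List.replicate (m+1) ((0:Int),"N")).drop (k+1) with hL
    rw [hcur, hset]
    have hc : aCell x y (R ++ L :: rest) (i+1) (k+1) = bCellV x y prev P (i+1) k := by
      rw [aCell_eq_bCellV x y _ prev L i k (hprev' L rest) (hcur L rest)]
      apply bCellV_congr
      rw [hL, getD_append_left _ _ _ _ (by omega)]
    rw [hc, hL, set_append_of_length hPlen, drop_fill_cons m (k+1) (by omega), List.set_cons_zero]
    rw [List.range_succ, List.foldl_append]
    simp only [List.foldl_cons, List.foldl_nil]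
    rw [bStep_eq, ← hP]
    simp

lemma getD_map_range {α : Type} (f : Nat → α) (i k : Nat) (h : i < k) (d : α) :
    ((List.range k).map f).getD i d = f i := by
  simp [List.getD, List.getElem?_map, List.getElem?_range h]

lemma outerA (x y : List Char) (n m : Nat) :
    ∀ i, i ≤ n →
    (List.range (i+1)).foldl (fun T i' => (List.range (m+1)).foldl (aInner x y i') T)
        (List.replicate (n+1) (List.replicate (m+1) ((0:Int),"N")))
      = (List.range (i+1)).map (rowFn x y m) ++ List.replicate (n - i) (List.replicate (m+1) ((0:Int),"N")) := by
  intro i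
  induction i with
  | zero =>
    intro _
    rw [List.range_succ (n := 0)]
    simp only [List.range_zero, List.nil_append, List.foldl_cons, List.foldl_nil]
    rw [List.replicate_succ]
    rw [innerA_zero x y m _ (m+1) (Nat.le_refl _)]
    rw [row0_eq_bRow0]
    simp [rowFn, bRow0]
  | succ i ihi =>
    intro hi
    rw [List.range_succ (n := i+1), List.foldl_append, ihi (by omega)]
    simp only [List.foldl_cons, List.foldl_nil]
    have hrepl : List.replicate (n - i) (List.replicate (m+1) ((0:Int),"N"))
        = List.replicate (m+1) ((0:Int),"N") :: List.replicate (n - (i+1)) (List.replicate (m+1) ((0:Int),"N")) := by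
      rw [show n - i = (n - (i+1)) + 1 from by omega, List.replicate_succ]
    rw [hrepl]
    have hR : ((List.range (i+1)).map (rowFn x y m)).length = i + 1 := by simp
    have hprev : ((List.range (i+1)).map (rowFn x y m)).getD i [] = rowFn x y m i :=
      getD_map_range _ i (i+1) (by omega) []
    rw [innerA_succ x y m i _ _ (rowFn x y m i) hR hprev m (Nat.le_refl _)]
    have hcast : ((2 * ((i:Int) + 1), "U") : Int × String) = (2 * (((i+1 : Nat)):Int), "U") := by
      simp only [Prod.mk.injEq]
      refine ⟨by push_cast; ring, trivial⟩
    rw [hcast]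
    rw [show ((List.replicate (m+1) ((0:Int),"N")).drop (m+1)) = ([] : List (Int × String)) from by simp]
    rw [List.append_nil]
    rw [show (List.range m).foldl (bStep x y (rowFn x y m i) (i+1)) [(2 * (((i+1 : Nat)):Int), "U")]
        = rowFn x y m (i+1) from rfl]
    simp [List.map_append]

-- ----- bridging rowFn to valF -----

lemma rowFn_val (x y : List Char) (m : Nat) :
    ∀ i, rowFn x y m i = (List.range (m+1)).map (valF x y i) := by
  intro i
  induction i with
  | zero =>
    apply List.ext_getElem
    · simp [rowFn]
    · intro j h1 h2
      match j with
      | 0 => simp [rowFn, valF]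
      | j+1 =>
        simp only [rowFn, List.getElem_cons_succ, List.getElem_map, List.getElem_range, valF]
  | succ i ih =>
    have key : ∀ k, k ≤ m →
        (List.range k).foldl (bStep x y (rowFn x y m i) (i+1)) [(2 * ((i+1:Nat) : Int), "U")]
          = (List.range (k+1)).map (valF x y (i+1)) := by
      intro k
      induction k with
      | zero =>
        intro _
        have h0 : valF x y (i+1) 0 = (2 * ((i+1:Nat) : Int), "U") := by
          rw [valF]
          simp only [Prod.mk.injEq]
          refine ⟨by push_cast; ring, trivial⟩
        simp [h0]
      | succ k ihk =>
        intro hk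
        rw [List.range_succ, List.foldl_append]
        simp only [List.foldl_cons, List.foldl_nil]
        rw [ihk (by omega), bStep_eq]
        have hrow : ((List.range (k+1)).map (valF x y (i+1))).getD k ((0:Int),"N") = valF x y (i+1) k :=
          getD_map_range _ k (k+1) (by omega) _
        have hprev1 : (rowFn x y m i).getD (k+1) ((0:Int),"N") = valF x y i (k+1) := by
          rw [ih]; exact getD_map_range _ (k+1) (m+1) (by omega) _
        have hprev0 : (rowFn x y m i).getD k ((0:Int),"N") = valF x y i k := by
          rw [ih]; exact getD_map_range _ k (m+1) (by omega) _
        have hcell : bCellV x y (rowFn x y m i) ((List.range (k+1)).map (valF x y (i+1))) (i+1) k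
            = valF x y (i+1) (k+1) := by
          simp only [bCellV, Nat.add_sub_cancel, hrow, hprev1, hprev0]
          show _ = valF x y (i+1) (k+1)
          simp only [valF]
          rw [min_comm ((valF x y (i+1) k).1 + 2) ((valF x y i (k+1)).1 + 2)]
        rw [hcell, List.range_succ (n := k+1), List.map_append]
        rfl
    have : bNext x y (rowFn x y m i) (i+1) m = (List.range (m+1)).map (valF x y (i+1)) := by
      unfold bNext
      have := key m (Nat.le_refl m)
      rwa [show ((2 * ((i+1:Nat) : Int), "U") : Int × String) = (2 * ((i:Int)+1), "U") from by
        simp only [Prod.mk.injEq]; refine ⟨by push_cast; ring, trivial⟩] at this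
    simpa [rowFn] using this


-- ----- B side: the memoised recursion computes valF -----

def GoodM (x y : List Char) (memo : PySem.Dict (Nat × Nat) (Int × String)) : Prop :=
  ∀ p r, memo.get? p = some r → r = valF x y p.1 p.2

lemma GoodM_empty (x y : List Char) : GoodM x y PySem.Dict.empty := by
  intro p r h
  simp [PySem.Dict.get?_empty] at h

lemma GoodM_insert (x y : List Char) (memo : PySem.Dict (Nat × Nat) (Int × String))
    (h : GoodM x y memo) (p : Nat × Nat) (v : Int × String) (hv : v = valF x y p.1 p.2) :
    GoodM x y (memo.insert p v) := by
  intro q r hq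
  rw [PySem.Dict.get?_insert] at hq
  by_cases hqp : q = p
  · rw [if_pos hqp] at hq
    cases hq
    rw [hv, hqp]
  · rw [if_neg hqp] at hq
    exact h q r hq

lemma compGet_iff (a b : Char) :
    compGet a = some b ↔ (a, b) ∈ [('C','G'), ('G','C'), ('A','T'), ('T','A')] := by
  by_cases hC : a = 'C'
  · subst hC; rw [show compGet 'C' = some 'G' from rfl]; simp [eq_comm]
  · by_cases hG : a = 'G'
    · subst hG; rw [show compGet 'G' = some 'C' from rfl]; simp [eq_comm]
    · by_cases hA : a = 'A'
      · subst hA; rw [show compGet 'A' = some 'T' from rfl]; simp [eq_comm]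
      · by_cases hT : a = 'T'
        · subst hT; rw [show compGet 'T' = some 'A' from rfl]; simp [eq_comm]
        · have hmk : PySem.Dict.ofList [('C','G'), ('G','C'), ('A','T'), ('T','A')]
              = PySem.Dict.mk [('C','G'), ('G','C'), ('A','T'), ('T','A')] := by decide
          have hn : compGet a = none := by
            simp [compGet, hmk, Ne.symm hC, Ne.symm hG, Ne.symm hA, Ne.symm hT, PySem.Dict.get?]
          simp [hn, hC, hG, hA, hT]

lemma sub_bridge (x y : List Char) (i' j' : Nat) :
    (if x.getD i' ' ' = y.getD j' ' ' then (0:Int)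
     else if compGet (x.getD i' ' ') = some (y.getD j' ' ') then 3 else 4)
      = pySub x y (i'+1) (j'+1) := by
  unfold pySub
  simp only [Nat.add_sub_cancel, compGet_iff]

theorem bCell_good (x y : List Char) (i j : Nat)
    (memo : PySem.Dict (Nat × Nat) (Int × String)) (h : GoodM x y memo) :
    (bCell x y i j memo).1 = valF x y i j ∧ GoodM x y (bCell x y i j memo).2 := by
  rw [bCell.eq_def]
  cases hm : PySem.Dict.get? memo (i, j) with
  | some r =>
    exact ⟨h (i, j) r hm, h⟩
  | none =>
    match i, j with
    | 0, 0 => exact ⟨by simp [valF], GoodM_insert x y memo h (0, 0) _ (by simp [valF])⟩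
    | 0, j'+1 => exact ⟨by simp [valF], GoodM_insert x y memo h (0, j'+1) _ (by simp [valF])⟩
    | i'+1, 0 => exact ⟨by simp [valF], GoodM_insert x y memo h (i'+1, 0) _ (by simp [valF])⟩
    | i'+1, j'+1 =>
      obtain ⟨h1v, h1g⟩ := bCell_good x y i' (j'+1) memo h
      obtain ⟨h2v, h2g⟩ := bCell_good x y (i'+1) j' _ h1g
      obtain ⟨h3v, h3g⟩ := bCell_good x y i' j' _ h2g
      simp only [h1v, h2v, h3v, sub_bridge]
      constructor
      · conv_rhs => rw [valF]
      · exact GoodM_insert x y _ h3g (i'+1, j'+1) _ (by conv_rhs => rw [valF])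
  termination_by (i, j)

lemma innerB (x y : List Char) (i : Nat) :
    ∀ k (acc : List (Int × String)) memo, GoodM x y memo →
      ((List.range k).foldl (bInner x y i) (acc, memo)).1 = acc ++ (List.range k).map (valF x y i)
      ∧ GoodM x y ((List.range k).foldl (bInner x y i) (acc, memo)).2 := by
  intro k
  induction k with
  | zero => intro acc memo h; simpa using h
  | succ k ih =>
    intro acc memo h
    rw [List.range_succ, List.foldl_append]
    simp only [List.foldl_cons, List.foldl_nil]
    obtain ⟨h1, h2⟩ := ih acc memo h
    obtain ⟨hc1, hc2⟩ := bCell_good x y i k _ h2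
    constructor
    · simp only [bInner, h1, hc1, List.map_append, List.map_cons, List.map_nil,
        List.append_assoc]
    · exact hc2

lemma outerB (x y : List Char) (m : Nat) :
    ∀ k (acc : List (List (Int × String))) memo, GoodM x y memo →
      ((List.range k).foldl (bOuter x y m) (acc, memo)).1
        = acc ++ (List.range k).map (fun i => (List.range (m+1)).map (valF x y i))
      ∧ GoodM x y ((List.range k).foldl (bOuter x y m) (acc, memo)).2 := by
  intro k
  induction k with
  | zero => intro acc memo h; simpa using h
  | succ k ih =>
    intro acc memo h
    rw [List.range_succ, List.foldl_append]
    simp only [List.foldl_cons, List.foldl_nil]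
    obtain ⟨h1, h2⟩ := ih acc memo h
    obtain ⟨hr1, hr2⟩ := innerB x y k (m+1) [] _ h2
    constructor
    · simp only [bOuter, h1]
      rw [hr1]
      simp [List.range_succ]
    · exact hr2

-- ===== VERDICT (by name: the statement is the Claim_ definition above) =====
theorem draw_T_2_spec : Claim_equal_draw_T_2 := by
  intro x y _
  unfold Spec_draw_T_2 draw_T_2 draw_T_2_alt
  simp only []
  rw [outerA x.toList y.toList x.toList.length y.toList.length x.toList.length (Nat.le_refl _)]
  obtain ⟨hB, -⟩ := outerB x.toList y.toList y.toList.length (x.toList.length+1) []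
    PySem.Dict.empty (GoodM_empty _ _)
  rw [hB]
  simp [rowFn_val]
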